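-- pv_equiv track=rewrite | github.com/andrevar/my-codewars-katas-solutions | 6 kyu/Simple array rotation.py | solve
-- ===== SOURCE A (Python) =====
-- def solver(arr):
--     if arr[0] == min(arr) and arr[-1] == max(arr):
--         return 'A'
--     if arr[0] == max(arr) and arr[-1] == min(arr):
--         return 'D'
--
-- def solve(arr):
--     count = 0
--     while solver(arr) == None:
--         arr = arr[1:] + [arr[0]]
--         count += 1
--     if count == 0:
--         return solver(arr)
--     return 'R' + solver(arr)
-- ===== SOURCE B (Python) =====
-- def solve(arr):
--     mn, mx = min(arr), max(arr)
--     for k in range(len(arr)):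
--         head, last = arr[k], arr[k - 1]   # arr[k-1] is the rotated array's last element (wraps at k=0)
--         if head == mn and last == mx:
--             return 'A' if k == 0 else 'RA'
--         if head == mx and last == mn:
--             return 'D' if k == 0 else 'RD'
-- ===== Notes on version B (the rewrite author's own statement) =====
-- stated objective: alternative
-- what changed: Instead of physically rotating the list and recomputing min/max at every step, B computes min and max once and does a single index scan for the first k whose rotated endpoints arr[k], arr[k-1] are extremal.
import Mathlib
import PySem

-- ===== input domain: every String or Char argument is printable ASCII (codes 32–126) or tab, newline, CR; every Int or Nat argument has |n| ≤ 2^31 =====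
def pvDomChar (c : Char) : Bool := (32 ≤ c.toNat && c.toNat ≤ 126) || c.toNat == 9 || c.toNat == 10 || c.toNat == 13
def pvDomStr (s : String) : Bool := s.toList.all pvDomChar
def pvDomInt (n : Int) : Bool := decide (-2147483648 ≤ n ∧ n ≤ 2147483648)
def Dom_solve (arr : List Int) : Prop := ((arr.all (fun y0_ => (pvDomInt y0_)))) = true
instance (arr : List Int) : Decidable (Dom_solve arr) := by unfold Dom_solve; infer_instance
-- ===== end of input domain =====

-- B replaces A's rotate-and-recheck loop (fresh min/max and a list copy per rotation) by one
-- min/max computation and a single scan over indices.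

-- ===== PORT A =====
def solverA (arr : List Int) : Option String :=
  match PySem.List.pyGet? arr 0, PySem.List.pyGet? arr (-1),
        PySem.List.min? arr (fun y => y), PySem.List.max? arr (fun y => y) with
  | some h, some l, some mn, some mx =>
      if h = mn ∧ l = mx then some "A"
      else if h = mx ∧ l = mn then some "D"
      else none
  | _, _, _, _ => none   -- arr = []: Python raises IndexError; excluded by Pre_solve

-- A's while-loop; fuel only makes the recursion total (Python diverges when no rotation ever
-- matches; those inputs are excluded by Pre_solve and fuel never runs out inside Pre_solve).
def solveLoopA (arr : List Int) (count : Nat) : Nat → String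
  | 0 => ""
  | fuel + 1 =>
      match solverA arr with
      | some s => if count = 0 then s else "R" ++ s
      | none =>
          solveLoopA (PySem.List.slice arr (some 1) none ++
                      ((PySem.List.pyGet? arr 0).elim [] (fun h => [h])))
            (count + 1) fuel

def solve (arr : List Int) : String := solveLoopA arr 0 (arr.length + 1)

-- ===== PORT B =====
def scanB (arr : List Int) (mn mx : Int) : List Int → String
  | [] => ""   -- Python B falls off the loop and returns None; excluded by Pre_solve
  | k :: ks =>
      if PySem.List.pyGetD arr k 0 = mn ∧ PySem.List.pyGetD arr (k - 1) 0 = mx then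
        (if k = 0 then "A" else "RA")
      else if PySem.List.pyGetD arr k 0 = mx ∧ PySem.List.pyGetD arr (k - 1) 0 = mn then
        (if k = 0 then "D" else "RD")
      else scanB arr mn mx ks

def solve_alt (arr : List Int) : String :=
  match PySem.List.min? arr (fun y => y), PySem.List.max? arr (fun y => y) with
  | some mn, some mx => scanB arr mn mx (PySem.List.pyRange 0 arr.length 1)
  | _, _ => ""   -- arr = []: Python raises ValueError; excluded by Pre_solve

-- ===== PRECONDITION & SPEC =====
def listMin (arr : List Int) : Int := match arr with | [] => 0 | h :: t => t.foldl min h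
def listMax (arr : List Int) : Int := match arr with | [] => 0 | h :: t => t.foldl max h
-- rotated endpoints of the k-th left rotation of arr: head arr[k], last arr[k-1] (wrapping at k=0)
def endpt (arr : List Int) (k : Nat) : Int :=
  if k = 0 then arr.getD (arr.length - 1) 0 else arr.getD (k - 1) 0
def preGood (arr : List Int) (k : Nat) : Bool :=
  (arr.getD k 0 == listMin arr && endpt arr k == listMax arr) ||
  (arr.getD k 0 == listMax arr && endpt arr k == listMin arr)

-- Pre_ excludes the empty list (A raises IndexError) and lists none of whose rotations has
-- extremal endpoints (A's while-loop never terminates there).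
def Pre_solve (arr : List Int) : Prop :=
  arr ≠ [] ∧ ((List.range arr.length).any (fun k => preGood arr k)) = true
instance (arr : List Int) : Decidable (Pre_solve arr) := by unfold Pre_solve; infer_instance
def pvWitness_solve : List Int := [2, 1]

def Spec_solve (arr : List Int) (out : String) : Prop := out = solve_alt arr
instance (arr : List Int) (out : String) : Decidable (Spec_solve arr out) := by unfold Spec_solve; infer_instance

-- ===== CLAIM (what is proved, stated in full; the proofs are below) =====
def Claim_equal_solve : Prop := ∀ (arr : List Int), Dom_solve arr → Pre_solve arr → Spec_solve arr (solve arr)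

-- ===== LEMMAS AND PROOFS =====
-- the k-th left rotation of arr
def rotL (arr : List Int) (j : Nat) : List Int := arr.drop j ++ arr.take j

theorem rotL_perm (arr : List Int) (j : Nat) : (rotL arr j).Perm arr := by
  unfold rotL
  calc (arr.drop j ++ arr.take j).Perm (arr.take j ++ arr.drop j) := List.perm_append_comm
    _ = arr := List.take_append_drop j arr

theorem min_val_eq (xs ys : List Int) (h : xs.Perm ys) (a b : Int)
    (ha : PySem.List.min? xs (fun y => y) = some a)
    (hb : PySem.List.min? ys (fun y => y) = some b) : a = b := by
  have hax := PySem.List.min?_mem ha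
  have hbx := PySem.List.min?_mem hb
  exact le_antisymm (PySem.List.min?_isMin ha b (h.mem_iff.mpr hbx))
                    (PySem.List.min?_isMin hb a (h.mem_iff.mp hax))

theorem max_val_eq (xs ys : List Int) (h : xs.Perm ys) (a b : Int)
    (ha : PySem.List.max? xs (fun y => y) = some a)
    (hb : PySem.List.max? ys (fun y => y) = some b) : a = b := by
  have hax := PySem.List.max?_mem ha
  have hbx := PySem.List.max?_mem hb
  exact le_antisymm (PySem.List.max?_isMax hb a (h.mem_iff.mp hax))
                    (PySem.List.max?_isMax ha b (h.mem_iff.mpr hbx))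

theorem min?_eq_listMin (arr : List Int) (h : arr ≠ []) :
    PySem.List.min? arr (fun y => y) = some (listMin arr) := by
  cases arr with
  | nil => exact absurd rfl h
  | cons x t => simpa [listMin] using PySem.List.min?_id_cons x t

theorem max?_eq_listMax (arr : List Int) (h : arr ≠ []) :
    PySem.List.max? arr (fun y => y) = some (listMax arr) := by
  cases arr with
  | nil => exact absurd rfl h
  | cons x t => simpa [listMax] using PySem.List.max?_id_cons x t

theorem rotL_ne_nil (arr : List Int) (j : Nat) (hj : j < arr.length) : rotL arr j ≠ [] := by
  unfold rotL
  intro hcon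
  have := List.append_eq_nil_iff.mp hcon
  have h1 : arr.drop j = [] := this.1
  have := List.drop_eq_nil_iff.mp h1
  omega

theorem min?_rotL (arr : List Int) (j : Nat) (hj : j < arr.length) :
    PySem.List.min? (rotL arr j) (fun y => y) = some (listMin arr) := by
  have hne := rotL_ne_nil arr j hj
  obtain ⟨a, ha⟩ : ∃ a, PySem.List.min? (rotL arr j) (fun y => y) = some a := by
    cases hm : PySem.List.min? (rotL arr j) (fun y => y) with
    | none => exact absurd ((PySem.List.min?_eq_none_iff _ _).mp hm) hne
    | some a => exact ⟨a, rfl⟩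
  have hne' : arr ≠ [] := by intro h; subst h; simp at hj
  rw [ha, min_val_eq _ _ (rotL_perm arr j) a (listMin arr) ha (min?_eq_listMin arr hne')]

theorem max?_rotL (arr : List Int) (j : Nat) (hj : j < arr.length) :
    PySem.List.max? (rotL arr j) (fun y => y) = some (listMax arr) := by
  have hne := rotL_ne_nil arr j hj
  obtain ⟨a, ha⟩ : ∃ a, PySem.List.max? (rotL arr j) (fun y => y) = some a := by
    cases hm : PySem.List.max? (rotL arr j) (fun y => y) with
    | none => exact absurd ((PySem.List.max?_eq_none_iff _ _).mp hm) hne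
    | some a => exact ⟨a, rfl⟩
  have hne' : arr ≠ [] := by intro h; subst h; simp at hj
  rw [ha, max_val_eq _ _ (rotL_perm arr j) a (listMax arr) ha (max?_eq_listMax arr hne')]

theorem rotL_head (arr : List Int) (j : Nat) (hj : j < arr.length) :
    PySem.List.pyGet? (rotL arr j) 0 = some (arr.getD j 0) := by
  rw [PySem.List.pyGet?_zero]
  unfold rotL
  rw [List.getElem?_append_left (by simp [List.length_drop]; omega)]
  rw [List.getElem?_drop]
  simp [List.getD_eq_getElem?_getD, List.getElem?_eq_getElem hj]

theorem rotL_last (arr : List Int) (j : Nat) (hj : j < arr.length) :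
    PySem.List.pyGet? (rotL arr j) (-1) = some (endpt arr j) := by
  cases j with
  | zero =>
      have hne : arr ≠ [] := by intro h; subst h; simp at hj
      unfold rotL endpt
      simp only [List.drop_zero, List.take_zero, List.append_nil]
      conv_lhs => rw [← List.dropLast_append_getLast hne]
      rw [PySem.List.pyGet?_neg_one_append_singleton]
      rw [List.getLast_eq_getElem]
      simp [List.getD_eq_getElem?_getD, List.getElem?_eq_getElem (by omega : arr.length - 1 < arr.length)]
  | succ s =>
      have hs : s < arr.length := by omega
      unfold rotL endpt
      rw [List.take_add_one]
      rw [List.getElem?_eq_getElem hs]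
      simp only [Option.toList_some]
      rw [← List.append_assoc, PySem.List.pyGet?_neg_one_append_singleton]
      simp [List.getD_eq_getElem?_getD, List.getElem?_eq_getElem hs]

theorem solverA_rotL (arr : List Int) (j : Nat) (hj : j < arr.length) :
    solverA (rotL arr j) =
      if arr.getD j 0 = listMin arr ∧ endpt arr j = listMax arr then some "A"
      else if arr.getD j 0 = listMax arr ∧ endpt arr j = listMin arr then some "D"
      else none := by
  unfold solverA
  rw [rotL_head arr j hj, rotL_last arr j hj, min?_rotL arr j hj, max?_rotL arr j hj]

theorem rotL_step (arr : List Int) (j : Nat) (hj : j < arr.length) :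
    PySem.List.slice (rotL arr j) (some 1) none ++
      ((PySem.List.pyGet? (rotL arr j) 0).elim [] (fun h => [h])) = rotL arr (j + 1) := by
  rw [PySem.List.slice_from_one, rotL_head arr j hj]
  unfold rotL
  rw [List.drop_eq_getElem_cons hj]
  simp only [List.cons_append, List.tail_cons, Option.elim_some]
  rw [List.append_assoc, List.take_add_one, List.getElem?_eq_getElem hj]
  simp [List.getD_eq_getElem?_getD, List.getElem?_eq_getElem hj]

theorem preGood_iff (arr : List Int) (j : Nat) :
    preGood arr j = true ↔
      ((arr.getD j 0 = listMin arr ∧ endpt arr j = listMax arr) ∨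
       (arr.getD j 0 = listMax arr ∧ endpt arr j = listMin arr)) := by
  simp [preGood]

theorem scanB_pyGetD_pred (arr : List Int) (j : Nat) (hne : arr ≠ []) :
    PySem.List.pyGetD arr ((j : Int) - 1) 0 = endpt arr j := by
  cases j with
  | zero =>
      simp only [Nat.cast_zero, zero_sub, endpt]
      rw [PySem.List.pyGetD_neg_one arr 0 hne, List.getLast_eq_getElem]
      simp [List.getD_eq_getElem?_getD, List.getElem?_eq_getElem (by
        have := List.length_pos_iff.mpr hne; omega : arr.length - 1 < arr.length)]
  | succ s =>
      have : ((s + 1 : Nat) : Int) - 1 = ((s : Nat) : Int) := by push_cast; ring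
      rw [this, PySem.List.pyGetD_natCast]
      simp [endpt]

theorem scanB_step (arr : List Int) (hne : arr ≠ []) (j : Nat) (ks : List Int) :
    scanB arr (listMin arr) (listMax arr) ((j : Int) :: ks) =
      (if arr.getD j 0 = listMin arr ∧ endpt arr j = listMax arr then (if j = 0 then "A" else "RA")
       else if arr.getD j 0 = listMax arr ∧ endpt arr j = listMin arr then (if j = 0 then "D" else "RD")
       else scanB arr (listMin arr) (listMax arr) ks) := by
  rw [scanB]
  rw [scanB_pyGetD_pred arr j hne]
  simp only [PySem.List.pyGetD_natCast, Int.natCast_eq_zero]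

theorem main_loop (arr : List Int) (hne : arr ≠ []) :
    ∀ (d j : Nat), arr.length - j = d → j ≤ arr.length →
      (∃ k, j ≤ k ∧ k < arr.length ∧ preGood arr k = true) →
      solveLoopA (rotL arr j) j (arr.length + 1 - j) =
        scanB arr (listMin arr) (listMax arr) (PySem.List.pyRange (j : Int) (arr.length : Int) 1) := by
  intro d
  induction d with
  | zero =>
      intro j hd hle hex
      obtain ⟨k, hk1, hk2, _⟩ := hex
      omega
  | succ d ih =>
      intro j hd hle hex
      have hj : j < arr.length := by omega
      have hfuel : arr.length + 1 - j = (arr.length - j - 1) + 1 + 1 := by omega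
      rw [hfuel]
      have hrange : PySem.List.pyRange (j : Int) (arr.length : Int) 1
          = (j : Int) :: PySem.List.pyRange ((j : Int) + 1) (arr.length : Int) 1 :=
        PySem.List.pyRange_one_cons (by exact_mod_cast hj)
      rw [hrange, scanB_step arr hne j]
      show (match solverA (rotL arr j) with
            | some s => if j = 0 then s else "R" ++ s
            | none => solveLoopA _ (j + 1) ((arr.length - j - 1) + 1)) = _
      rw [solverA_rotL arr j hj]
      by_cases hA : arr.getD j 0 = listMin arr ∧ endpt arr j = listMax arr
      · rw [if_pos hA, if_pos hA]
        show (if j = 0 then "A" else "R" ++ "A") = _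
        by_cases h0 : j = 0
        · rw [if_pos h0, if_pos h0]
        · rw [if_neg h0, if_neg h0]; rfl
      · rw [if_neg hA, if_neg hA]
        by_cases hD : arr.getD j 0 = listMax arr ∧ endpt arr j = listMin arr
        · rw [if_pos hD, if_pos hD]
          show (if j = 0 then "D" else "R" ++ "D") = _
          by_cases h0 : j = 0
          · rw [if_pos h0, if_pos h0]
          · rw [if_neg h0, if_neg h0]; rfl
        · rw [if_neg hD, if_neg hD]
          show solveLoopA (PySem.List.slice (rotL arr j) (some 1) none ++
              ((PySem.List.pyGet? (rotL arr j) 0).elim [] (fun h => [h])))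
              (j + 1) ((arr.length - j - 1) + 1) = _
          rw [rotL_step arr j hj]
          have hcast : ((j : Int) + 1) = (((j + 1 : Nat)) : Int) := by push_cast; ring
          rw [hcast]
          have hfuel2 : (arr.length - j - 1) + 1 = arr.length + 1 - (j + 1) := by omega
          rw [hfuel2]
          apply ih (j + 1) (by omega) (by omega)
          obtain ⟨k, hk1, hk2, hk3⟩ := hex
          refine ⟨k, ?_, hk2, hk3⟩
          have hjk : j ≠ k := by
            intro he
            rw [← he] at hk3
            rcases (preGood_iff arr j).mp hk3 with h' | h'
            · exact hA h'
            · exact hD h'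
          omega

-- ===== VERDICT (by name: the statement is the Claim_ definition above) =====
theorem solve_spec : Claim_equal_solve := by
  intro arr _ hpre
  obtain ⟨hne, hany⟩ := hpre
  unfold Spec_solve solve solve_alt
  rw [min?_eq_listMin arr hne, max?_eq_listMax arr hne]
  have hex : ∃ k, 0 ≤ k ∧ k < arr.length ∧ preGood arr k = true := by
    obtain ⟨k, hk, hg⟩ := List.any_eq_true.mp hany
    exact ⟨k, Nat.zero_le k, List.mem_range.mp hk, hg⟩
  have := main_loop arr hne arr.length 0 (by omega) (by omega) hex
  simpa [rotL] using this
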